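-- pv_equiv track=rewrite | github.com/BraffZacklin/GrabBag | portstudy.py | make_all_letters_lower
-- ===== SOURCE A (Python) =====
-- def make_all_letters_lower(protocol):
-- 	blank_list = []
-- 	protocol_list = list(protocol)
-- 	for character in protocol_list:
-- 		stripped_char = character.strip()
-- 		if stripped_char.isupper() == True:
-- 			patchedchar = stripped_char.lower()
-- 		else:
-- 			patchedchar = stripped_char
-- 		blank_list.append(patchedchar)
-- 	fixedprotocol = ''.join(blank_list)
-- 	return fixedprotocol
-- ===== SOURCE B (Python) =====
-- def make_all_letters_lower(protocol):
-- 	return ''.join(protocol.lower().split())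
-- ===== Notes on version B (the rewrite author's own statement) =====
-- stated objective: simpler
-- what changed: Replaces the per-character loop (strip each char, branch on isupper, append, join) with a whole-string transform: lowercase once, split on whitespace runs, rejoin.
import Mathlib
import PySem

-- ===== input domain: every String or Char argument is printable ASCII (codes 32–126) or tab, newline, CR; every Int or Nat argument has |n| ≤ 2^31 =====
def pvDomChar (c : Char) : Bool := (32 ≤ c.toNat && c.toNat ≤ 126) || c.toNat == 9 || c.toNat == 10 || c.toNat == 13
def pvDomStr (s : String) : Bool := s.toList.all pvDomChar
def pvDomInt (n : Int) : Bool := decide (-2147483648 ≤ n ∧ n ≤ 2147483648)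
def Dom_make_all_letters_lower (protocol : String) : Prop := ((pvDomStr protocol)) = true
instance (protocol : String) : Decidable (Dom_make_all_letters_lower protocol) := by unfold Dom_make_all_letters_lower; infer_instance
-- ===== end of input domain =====

-- B replaces A's per-character loop (strip each char, branch on isupper, append, join)
-- by one whole-string transform: lowercase once, split on whitespace runs, rejoin.

-- ===== PORT A =====
-- Python str.isupper(): at least one cased character and no lowercase one; exact for the
-- ASCII strings it is applied to here (the strip of a single character).
def pyStrIsupper (cs : List Char) : Bool :=
  cs.any (fun c => PySem.Chars.isupper c || PySem.Chars.islower c) &&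
    !cs.any (fun c => PySem.Chars.islower c)

def make_all_letters_lower (protocol : String) : String :=
  let protocol_list := protocol.toList
  let blank_list := protocol_list.foldl (fun acc character =>
    let stripped_char := PySem.Chars.strip [character]
    let patchedchar := if pyStrIsupper stripped_char = true
                       then PySem.Chars.lower stripped_char else stripped_char
    acc ++ [patchedchar]) ([] : List (List Char))
  String.ofList (PySem.Chars.join [] blank_list)

-- ===== PORT B =====
def make_all_letters_lower_alt (protocol : String) : String :=
  String.ofList (PySem.Chars.join [] (PySem.Chars.split₀ (PySem.Chars.lower protocol.toList)))

-- ===== PRECONDITION & SPEC =====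
def Spec_make_all_letters_lower (protocol : String) (out : String) : Prop := out = make_all_letters_lower_alt protocol
instance (protocol : String) (out : String) : Decidable (Spec_make_all_letters_lower protocol out) := by unfold Spec_make_all_letters_lower; infer_instance

-- ===== CLAIM (what is proved, stated in full; the proofs are below) =====
def Claim_equal_make_all_letters_lower : Prop := ∀ (protocol : String), Dom_make_all_letters_lower protocol → Spec_make_all_letters_lower protocol (make_all_letters_lower protocol)

-- ===== LEMMAS AND PROOFS =====

-- ''.join on code-point lists is flatten.
theorem pv_join_nil_flatten (L : List (List Char)) : PySem.Chars.join [] L = L.flatten := by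
  induction L with
  | nil => rfl
  | cons x xs ih =>
    simp [PySem.Chars.join, List.intercalate] at *
    cases xs <;> simp_all [List.intersperse]

-- Stripping a one-character string keeps it iff the character is not whitespace.
theorem pv_strip_single (c : Char) :
    PySem.Chars.strip [c] = if PySem.Chars.isspace c = true then [] else [c] := by
  simp [PySem.Chars.strip, PySem.Chars.lstrip, PySem.Chars.rstrip]
  split_ifs <;> simp_all

-- A character in 33..126 is not Python whitespace.
theorem pv_isspace_false (c : Char) (h1 : 33 ≤ c.toNat) (h2 : c.toNat ≤ 126) :
    PySem.Chars.isspace c = false := by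
  unfold PySem.Chars.isspace
  simp only [Bool.or_eq_false_iff, Bool.and_eq_false_iff, decide_eq_false_iff_not]
  omega

-- Lowercasing a character does not change whether it is whitespace.
theorem pv_isspace_lowerChar (c : Char) :
    PySem.Chars.isspace (PySem.Chars.lowerChar c) = PySem.Chars.isspace c := by
  by_cases h : PySem.Chars.isupper c = true
  · simp only [PySem.Chars.lowerChar, h, if_pos]
    simp only [PySem.Chars.isupper, Bool.and_eq_true, decide_eq_true_eq] at h
    obtain ⟨h1, h2⟩ := h
    rw [Char.le_def] at h1 h2
    have hb : 65 ≤ c.toNat ∧ c.toNat ≤ 90 := ⟨h1, h2⟩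
    have hv : Nat.isValidChar (c.toNat + 32) := Or.inl (by omega)
    have hn : (Char.ofNat (c.toNat + 32)).toNat = c.toNat + 32 := by
      unfold Char.ofNat
      rw [dif_pos hv]
      rfl
    rw [pv_isspace_false c (by omega) (by omega),
      pv_isspace_false _ (by omega) (by omega)]
  · simp [PySem.Chars.lowerChar, h]

-- A's per-character result is: drop whitespace, otherwise the lowercased character.
theorem pv_perChar (c : Char) :
    (if pyStrIsupper (PySem.Chars.strip [c]) = true
     then PySem.Chars.lower (PySem.Chars.strip [c]) else PySem.Chars.strip [c]) =
    (if PySem.Chars.isspace c = true then [] else [PySem.Chars.lowerChar c]) := by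
  rw [pv_strip_single c]
  by_cases hs : PySem.Chars.isspace c = true
  · simp [hs, pyStrIsupper]
  · simp only [if_neg hs]
    by_cases hu : PySem.Chars.isupper c = true
    · have hl : PySem.Chars.islower c = false := by
        simp only [PySem.Chars.isupper, Bool.and_eq_true, decide_eq_true_eq] at hu
        obtain ⟨h1, h2⟩ := hu
        rw [Char.le_def] at h1 h2
        have hb : c.toNat ≤ 90 := h2
        rw [Bool.eq_false_iff]
        intro hcon
        simp only [PySem.Chars.islower, Bool.and_eq_true, decide_eq_true_eq] at hcon
        obtain ⟨g1, g2⟩ := hcon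
        rw [Char.le_def] at g1
        have hg : (97 : Nat) ≤ c.toNat := g1
        omega
      simp [pyStrIsupper, hu, hl, PySem.Chars.lower]
    · have hid : PySem.Chars.lowerChar c = c := by simp [PySem.Chars.lowerChar, hu]
      by_cases hl : PySem.Chars.islower c = true <;>
        simp [pyStrIsupper, hu, hl, hid]

-- split().go flattens to the non-whitespace characters, in order.
theorem pv_split0_go_flatten (s : List Char) : ∀ (cur : List Char) (acc : List (List Char)),
    (PySem.Chars.split₀.go s cur acc).flatten =
      acc.reverse.flatten ++ cur.reverse ++ s.filter (fun c => !PySem.Chars.isspace c) := by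
  induction s with
  | nil =>
    intro cur acc
    simp [PySem.Chars.split₀.go]
    split_ifs with h <;> simp_all
  | cons c rest ih =>
    intro cur acc
    simp only [PySem.Chars.split₀.go]
    by_cases hs : PySem.Chars.isspace c = true
    · simp only [hs, if_pos]
      by_cases hc : cur.isEmpty = true
      · have hcur : cur = [] := by simpa [List.isEmpty_iff] using hc
        simp [ih, hcur, List.filter, hs]
      · simp [hc, ih, List.filter, hs]
    · simp [hs, ih, List.filter]

-- ===== VERDICT (by name: the statement is the Claim_ definition above) =====
theorem make_all_letters_lower_spec : Claim_equal_make_all_letters_lower := by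
  intro protocol _
  show make_all_letters_lower protocol = make_all_letters_lower_alt protocol
  unfold make_all_letters_lower make_all_letters_lower_alt
  change String.ofList (PySem.Chars.join [] (protocol.toList.foldl (fun acc character =>
      acc ++ [if pyStrIsupper (PySem.Chars.strip [character]) = true
              then PySem.Chars.lower (PySem.Chars.strip [character])
              else PySem.Chars.strip [character]]) [])) = _
  rw [PySem.List.foldl_append_singleton_eq_map, pv_join_nil_flatten, pv_join_nil_flatten,
    PySem.Chars.split₀, pv_split0_go_flatten]
  simp only [List.nil_append, List.reverse_nil, List.flatten_nil]
  congr 1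
  induction protocol.toList with
  | nil => rfl
  | cons c cs ih =>
    have hlc : PySem.Chars.lower (c :: cs) = PySem.Chars.lowerChar c :: PySem.Chars.lower cs :=
      rfl
    rw [List.map_cons, List.flatten_cons, pv_perChar, hlc, List.filter_cons]
    by_cases hs : PySem.Chars.isspace c = true <;>
      simp [pv_isspace_lowerChar, hs, ih]
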